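-- pv_equiv track=rewrite | github.com/etiennebourgault/datascor | datascore_bot.py | absence_penalty
-- ===== SOURCE A (Python) =====
-- def absence_penalty(absences):
--     """Calcule la pénalité de confiance selon les absences"""
--     penalty = 0
--     for p in absences:
--         imp = p.get('importance','backup')
--         if imp == 'star':     penalty += 15
--         elif imp == 'starter': penalty += 8
--         else:                  penalty += 3
--     return penalty
-- ===== SOURCE B (Python) =====
-- def absence_penalty(absences):
--     """Calcule la pénalité de confiance selon les absences"""
--     imps = [p.get('importance', 'backup') for p in absences]
--     star = imps.count('star')
--     starter = imps.count('starter')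
--     return 15 * star + 8 * starter + 3 * (len(imps) - star - starter)
-- ===== Notes on version B (the rewrite author's own statement) =====
-- stated objective: alternative
-- what changed: Replaces the per-element running sum with a tally-first structure: extract all importance values, count the 'star' and 'starter' buckets, and return a closed-form weighted combination 15*star + 8*starter + 3*(rest).
import Mathlib
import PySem

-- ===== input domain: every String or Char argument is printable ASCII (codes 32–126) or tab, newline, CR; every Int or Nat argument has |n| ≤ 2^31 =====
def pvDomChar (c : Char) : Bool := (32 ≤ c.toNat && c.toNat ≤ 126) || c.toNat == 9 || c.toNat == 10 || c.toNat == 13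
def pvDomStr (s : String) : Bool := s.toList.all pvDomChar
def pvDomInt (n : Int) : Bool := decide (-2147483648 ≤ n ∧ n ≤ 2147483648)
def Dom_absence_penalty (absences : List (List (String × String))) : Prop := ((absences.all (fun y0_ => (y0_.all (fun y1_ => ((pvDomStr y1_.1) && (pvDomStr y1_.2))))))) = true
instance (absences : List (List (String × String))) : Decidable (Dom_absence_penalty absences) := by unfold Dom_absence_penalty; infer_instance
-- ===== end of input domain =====

-- ===== PORT A =====
-- B tallies importance categories once and returns a closed-form weighted combination (alternative decomposition, same cost).
def absence_penalty (absences : List (List (String × String))) : Int :=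
  absences.foldl (fun penalty p =>
    let imp := (PySem.Dict.ofList p).getD "importance" "backup"
    if imp = "star" then penalty + 15
    else if imp = "starter" then penalty + 8
    else penalty + 3) 0

-- ===== PORT B =====
def absence_penalty_alt (absences : List (List (String × String))) : Int :=
  let imps := absences.map (fun p => (PySem.Dict.ofList p).getD "importance" "backup")
  let star := PySem.List.count imps "star"
  let starter := PySem.List.count imps "starter"
  15 * star + 8 * starter + 3 * (PySem.List.len imps - star - starter)

-- ===== PRECONDITION & SPEC =====
def Spec_absence_penalty (absences : List (List (String × String))) (out : Int) : Prop := out = absence_penalty_alt absences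
instance (absences : List (List (String × String))) (out : Int) : Decidable (Spec_absence_penalty absences out) := by unfold Spec_absence_penalty; infer_instance

-- ===== CLAIM (what is proved, stated in full; the proofs are below) =====
def Claim_equal_absence_penalty : Prop := ∀ (absences : List (List (String × String))), Dom_absence_penalty absences → Spec_absence_penalty absences (absence_penalty absences)

-- ===== LEMMAS AND PROOFS =====

-- ===== VERDICT (by name: the statement is the Claim_ definition above) =====
lemma absence_penalty_fold (absences : List (List (String × String))) (init : Int) :
    absences.foldl (fun penalty p =>
      let imp := (PySem.Dict.ofList p).getD "importance" "backup"
      if imp = "star" then penalty + 15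
      else if imp = "starter" then penalty + 8
      else penalty + 3) init = init + absence_penalty_alt absences := by
  induction absences generalizing init with
  | nil => simp [absence_penalty_alt, PySem.List.count]
  | cons p rest ih =>
    simp only [List.foldl_cons, ih]
    simp only [absence_penalty_alt, List.map_cons, PySem.List.count_eq, PySem.List.len_eq,
      List.count_cons, List.length_cons]
    split_ifs with h1 h2 <;> simp_all <;> ring

theorem absence_penalty_spec : Claim_equal_absence_penalty := by
  intro absences _
  unfold Spec_absence_penalty absence_penalty
  rw [absence_penalty_fold]
  ring
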